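-- pv_equiv track=rewrite | github.com/daveboat/interview_prep | coding_practice/stacks/bracketcompletion.py | cluster
-- ===== SOURCE A (Python) =====
-- def cluster(txt):
--     parenthesis_stack = []
--
--     output_list = []
--     string_builder = ''
--     for chr in txt:
--         if chr == '(':
--             parenthesis_stack.append(chr)
--         elif chr == ')':
--             parenthesis_stack.pop()
--
--         string_builder += chr
--
--         if len(parenthesis_stack) == 0:
--             output_list.append(string_builder)
--             string_builder = ''
--
--     return output_list
-- ===== SOURCE B (Python) =====
-- def cluster(txt):
--     boundaries = []
--     depth = 0
--     for i, c in enumerate(txt):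
--         if c == '(':
--             depth += 1
--         elif c == ')':
--             depth -= 1
--         if depth == 0:
--             boundaries.append(i + 1)
--     out = []
--     prev = 0
--     for b in boundaries:
--         out.append(txt[prev:b])
--         prev = b
--     return out
-- ===== Notes on version B (the rewrite author's own statement) =====
-- stated objective: alternative
-- what changed: B replaces A's incremental string_builder/stack accumulation with a depth counter that records cluster-boundary indices in one pass and then materialises the clusters by slicing txt between consecutive boundaries; Pre_ excludes inputs with a prefix containing more ')' than '(', on which A raises IndexError.
import Mathlib
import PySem

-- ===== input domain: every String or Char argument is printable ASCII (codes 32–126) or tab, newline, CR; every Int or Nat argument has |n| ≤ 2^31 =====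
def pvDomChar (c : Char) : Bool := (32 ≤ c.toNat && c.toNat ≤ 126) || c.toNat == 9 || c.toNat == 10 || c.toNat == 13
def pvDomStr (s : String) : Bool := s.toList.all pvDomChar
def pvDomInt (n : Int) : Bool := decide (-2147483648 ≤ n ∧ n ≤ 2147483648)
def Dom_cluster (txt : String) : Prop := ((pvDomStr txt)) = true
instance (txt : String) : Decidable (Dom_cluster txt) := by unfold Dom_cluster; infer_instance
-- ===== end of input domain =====

-- B records boundary indices with a depth counter and slices txt between them, instead of A's stack list plus incremental string accumulation.

-- ===== PORT A =====
-- state: (parenthesis_stack, output_list, string_builder); 'pop' on a non-empty stack is dropLast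
-- (Pre_cluster guarantees the stack is non-empty whenever ')' is seen; Python raises IndexError otherwise)
def clusterStepA (s : List Char × List String × List Char) (c : Char) :
    List Char × List String × List Char :=
  let stack := if c = '(' then s.1 ++ [c] else if c = ')' then s.1.dropLast else s.1
  let sb := s.2.2 ++ [c]
  if stack.length = 0 then (stack, s.2.1 ++ [String.ofList sb], [])
  else (stack, s.2.1, sb)

def cluster (txt : String) : List String :=
  (txt.toList.foldl clusterStepA ([], [], [])).2.1

-- ===== PORT B =====
def clusterStepB (s : Int × List Int) (p : Int × Char) : Int × List Int :=
  let d := if p.2 = '(' then s.1 + 1 else if p.2 = ')' then s.1 - 1 else s.1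
  if d = 0 then (d, s.2 ++ [p.1 + 1]) else (d, s.2)

def clusterStepS (L : List Char) (s : Int × List String) (b : Int) : Int × List String :=
  (b, s.2 ++ [String.ofList (PySem.List.slice L (some s.1) (some b))])

def cluster_alt (txt : String) : List String :=
  let bs := ((PySem.List.enumerate txt.toList 0).foldl clusterStepB (0, [])).2
  (bs.foldl (clusterStepS txt.toList) (0, [])).2

-- ===== PRECONDITION & SPEC =====
-- Pre_ excludes exactly the inputs where some prefix has more ')' than '(' : there A's stack.pop() raises IndexError.
def Pre_cluster (txt : String) : Prop :=
  ∀ p ∈ txt.toList.inits, p.count ')' ≤ p.count '('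
instance (txt : String) : Decidable (Pre_cluster txt) := by unfold Pre_cluster; infer_instance

def pvWitness_cluster : String := "(a)b()"

def Spec_cluster (txt : String) (out : List String) : Prop := out = cluster_alt txt
instance (txt : String) (out : List String) : Decidable (Spec_cluster txt out) := by unfold Spec_cluster; infer_instance

-- ===== CLAIM (what is proved, stated in full; the proofs are below) =====
def Claim_equal_cluster : Prop := ∀ (txt : String), Dom_cluster txt → Pre_cluster txt → Spec_cluster txt (cluster txt)

-- ===== LEMMAS AND PROOFS =====

-- depth update
def clUpd (d : Int) (c : Char) : Int := if c = '(' then d + 1 else if c = ')' then d - 1 else d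

-- validity: whenever ')' is consumed the depth is positive
def clValid (d : Int) : List Char → Prop
  | [] => True
  | c :: cs => (c = ')' → 1 ≤ d) ∧ clValid (clUpd d c) cs

-- common recursive specification of the cluster list
def clF (sb : List Char) (d : Int) : List Char → List String
  | [] => []
  | c :: cs =>
    if clUpd d c = 0 then String.ofList (sb ++ [c]) :: clF [] 0 cs
    else clF (sb ++ [c]) (clUpd d c) cs

-- boundary positions (end-exclusive), from index i at depth d
def clBnds (i d : Int) : List Char → List Int
  | [] => []
  | c :: cs => (if clUpd d c = 0 then [i + 1] else []) ++ clBnds (i + 1) (clUpd d c) cs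

-- slices of L between consecutive boundaries
def clSlices (L : List Char) (prev : Int) : List Int → List String
  | [] => []
  | b :: bs => String.ofList (PySem.List.slice L (some prev) (some b)) :: clSlices L b bs

lemma clA_fold (cs : List Char) : ∀ (stack : List Char) (d : Int) (out : List String) (sb : List Char),
    0 ≤ d → stack.length = d.toNat → clValid d cs →
    (cs.foldl clusterStepA (stack, out, sb)).2.1 = out ++ clF sb d cs := by
  induction cs with
  | nil => intro stack d out sb _ _ _; simp [clF]
  | cons c cs ih =>
    intro stack d out sb hd hlen hv
    obtain ⟨hpop, hv'⟩ := hv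
    simp only [List.foldl_cons, clF]
    by_cases hc1 : c = '('
    · subst hc1
      have hv2 : clValid (d + 1) cs := by simpa [clUpd] using hv'
      have ihh := ih (stack ++ ['(']) (d + 1) out (sb ++ ['(']) (by omega)
        (by simp [hlen]; omega) hv2
      have hz : ¬ (d + 1 = 0) := by omega
      simp at ihh
      simp [clusterStepA, clUpd, hz, ihh]
    · by_cases hc2 : c = ')'
      · subst hc2
        have hd1 : 1 ≤ d := hpop rfl
        have hv2 : clValid (d - 1) cs := by simpa [clUpd] using hv'
        have hlen' : stack.dropLast.length = (d - 1).toNat := by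
          simp only [List.length_dropLast, hlen]; omega
        by_cases hz : d - 1 = 0
        · have hL : stack.length - 1 = 0 := by omega
          have ihh := ih stack.dropLast (d - 1) (out ++ [String.ofList (sb ++ [')'])]) []
            (by omega) hlen' hv2
          rw [hz] at ihh
          simp at ihh
          simp [clusterStepA, clUpd, hL, hz, ihh]
        · have hL : ¬ (stack.length - 1 = 0) := by omega
          have ihh := ih stack.dropLast (d - 1) out (sb ++ [')']) (by omega) hlen' hv2
          simp at ihh
          simp [clusterStepA, clUpd, hL, hz, ihh]
      · have hv2 : clValid d cs := by simpa [clUpd, hc1, hc2] using hv'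
        by_cases hz : d = 0
        · have hL : stack.length = 0 := by omega
          have ihh := ih stack d (out ++ [String.ofList (sb ++ [c])]) [] hd hlen hv2
          simp at ihh
          simp [clusterStepA, clUpd, hc1, hc2, hL, hz, ihh]
        · have hL : ¬ stack.length = 0 := by omega
          have ihh := ih stack d out (sb ++ [c]) hd hlen hv2
          simp at ihh
          simp [clusterStepA, clUpd, hc1, hc2, hL, hz, ihh]

lemma clB_fold (cs : List Char) : ∀ (i d : Int) (acc : List Int),
    ((PySem.List.enumerate cs i).foldl clusterStepB (d, acc)).2 = acc ++ clBnds i d cs := by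
  induction cs with
  | nil => intro i d acc; simp [PySem.List.enumerate_nil, clBnds]
  | cons c cs ih =>
    intro i d acc
    rw [PySem.List.enumerate_cons]
    simp only [List.foldl_cons, clusterStepB, clBnds]
    by_cases hz : clUpd d c = 0 <;> simp only [clUpd] at hz
    · rw [if_pos hz, ih]
      simp [clUpd, hz]
    · rw [if_neg hz, ih]
      simp [clUpd, hz]

lemma clS_fold (L : List Char) (bs : List Int) : ∀ (prev : Int) (acc : List String),
    (bs.foldl (clusterStepS L) (prev, acc)).2 = acc ++ clSlices L prev bs := by
  induction bs with
  | nil => intro prev acc; simp [clSlices]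
  | cons b bs ih =>
    intro prev acc
    simp only [List.foldl_cons, clusterStepS, clSlices, ih]
    simp

lemma clSlice_snoc (L : List Char) (a i : Nat) (ha : a ≤ i) (hi : i < L.length) :
    PySem.List.slice L (some (a : Int)) (some ((i : Int) + 1)) =
      PySem.List.slice L (some (a : Int)) (some (i : Int)) ++ [L[i]] := by
  rw [PySem.List.slice_toNat L (by omega) (by omega),
      PySem.List.slice_toNat L (by omega) (by omega)]
  have e1 : ((i : Int)).toNat = i := by omega
  have e2 : ((i : Int) + 1).toNat = i + 1 := by omega
  have e3 : ((a : Int)).toNat = a := by omega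
  rw [e1, e2, e3, show i + 1 - a = (i - a) + 1 by omega, List.take_add_one]
  congr 1
  have : (L.drop a)[i - a]? = some L[i] := by
    rw [List.getElem?_drop, show a + (i - a) = i by omega]
    simp [hi]
  simp [this]

lemma clSlice_self (L : List Char) (a : Nat) :
    PySem.List.slice L (some (a : Int)) (some (a : Int)) = [] := by
  rw [PySem.List.slice_toNat L (by omega) (by omega)]
  simp

lemma clB3 (cs : List Char) : ∀ (L : List Char) (i a : Nat) (d : Int),
    a ≤ i → cs = L.drop i →
    clSlices L (a : Int) (clBnds (i : Int) d cs) =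
      clF (PySem.List.slice L (some (a : Int)) (some (i : Int))) d cs := by
  induction cs with
  | nil => intro L i a d _ _; simp [clBnds, clSlices, clF]
  | cons c cs ih =>
    intro L i a d hai hdrop
    have hi : i < L.length := by
      by_contra h
      rw [List.drop_eq_nil_of_le (by omega)] at hdrop
      exact List.cons_ne_nil _ _ hdrop
    have hpair : c :: cs = L[i] :: L.drop (i + 1) :=
      hdrop.trans (List.drop_eq_getElem_cons hi)
    obtain ⟨hci, hcs'⟩ : c = L[i] ∧ cs = L.drop (i + 1) := by
      injection hpair with h1 h2; exact ⟨h1, h2⟩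
    have hsnoc : PySem.List.slice L (some (a : Int)) (some ((i : Int) + 1)) =
        PySem.List.slice L (some (a : Int)) (some (i : Int)) ++ [c] := by
      rw [clSlice_snoc L a i hai hi, hci]
    by_cases hz : clUpd d c = 0
    · simp only [clBnds, clF, if_pos hz, List.singleton_append, clSlices]
      have ihh := ih L (i + 1) (i + 1) 0 le_rfl hcs'
      rw [clSlice_self] at ihh
      push_cast at ihh ⊢
      rw [hsnoc, hz, ihh]
    · simp only [clBnds, clF, if_neg hz, List.nil_append]
      have ihh := ih L (i + 1) a (clUpd d c) (by omega) hcs'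
      push_cast at ihh ⊢
      rw [hsnoc] at ihh
      exact ihh

lemma clPre_valid (cs : List Char) : ∀ (d : Int),
    (∀ p ∈ cs.inits, (p.count ')' : Int) ≤ d + p.count '(') → clValid d cs := by
  induction cs with
  | nil => intro d _; trivial
  | cons c cs ih =>
    intro d h
    constructor
    · intro hc
      have h2 := h [c] (by simp)
      subst hc
      simp at h2
      omega
    · apply ih
      intro p hp
      have hmem : c :: p ∈ (c :: cs).inits := by
        rw [List.inits_cons]
        exact List.mem_cons_of_mem _ (List.mem_map_of_mem hp)
      have h2 := h (c :: p) hmem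
      simp only [List.count_cons] at h2
      unfold clUpd
      split_ifs with hc1 hc2
      · subst hc1
        simp at h2
        omega
      · subst hc2
        simp at h2
        omega
      · simp [hc1, hc2] at h2
        omega

-- ===== VERDICT (by name: the statement is the Claim_ definition above) =====
theorem cluster_spec : Claim_equal_cluster := by
  intro txt _ hpre
  unfold Spec_cluster cluster cluster_alt
  have hvalid : clValid 0 txt.toList := by
    apply clPre_valid
    intro p hp
    have := hpre p hp
    omega
  rw [clA_fold txt.toList [] 0 [] [] (le_refl 0) rfl hvalid]
  rw [clB_fold txt.toList 0 0 []]
  rw [clS_fold txt.toList _ 0 []]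
  simp only [List.nil_append]
  have h3 := clB3 txt.toList txt.toList 0 0 0 (le_refl 0) (by simp)
  rw [clSlice_self] at h3
  exact h3.symm
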